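-- pv_equiv track=rewrite | github.com/KaiReytsu/Homework-arrays | string_parsing.py | letter_max_count
-- ===== SOURCE A (Python) =====
-- def letter_cout(string):
--     parsed_string = string.lower().split()
--     parsed_string = ''.join(parsed_string)
--     analysis = {}
--     for letter in parsed_string:
--         if letter in analysis:
--             analysis[letter] += 1
--         else:
--             analysis[letter] = 1
--     return analysis
--
-- def letter_max_count(string):
--     parsed_list = letter_cout(string)
--     analysis = {}
--     current_max = -1
--     for letter in parsed_list:
--         temp = parsed_list[letter]
--         if(temp >= current_max):
--             if(temp > current_max):
--                 analysis.clear()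
--                 current_max = temp
--             analysis[letter] = temp;
--     return analysis
-- ===== SOURCE B (Python) =====
-- def letter_max_count(string):
--     letters = list(''.join(string.lower().split()))
--     if not letters:
--         return {}
--     m = max(letters.count(c) for c in letters)
--     return {c: m for c in dict.fromkeys(letters) if letters.count(c) == m}
-- ===== Notes on version B (the rewrite author's own statement) =====
-- stated objective: alternative
-- what changed: B builds no frequency dictionary at all: it computes the maximal multiplicity directly as max of letters.count(c) over the letter list, then emits {c: m} for each first-occurrence-deduplicated letter whose list.count equals m, replacing A's hash-accumulation plus running-max clear-and-rebuild loop with per-letter brute-force counting.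
import Mathlib
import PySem

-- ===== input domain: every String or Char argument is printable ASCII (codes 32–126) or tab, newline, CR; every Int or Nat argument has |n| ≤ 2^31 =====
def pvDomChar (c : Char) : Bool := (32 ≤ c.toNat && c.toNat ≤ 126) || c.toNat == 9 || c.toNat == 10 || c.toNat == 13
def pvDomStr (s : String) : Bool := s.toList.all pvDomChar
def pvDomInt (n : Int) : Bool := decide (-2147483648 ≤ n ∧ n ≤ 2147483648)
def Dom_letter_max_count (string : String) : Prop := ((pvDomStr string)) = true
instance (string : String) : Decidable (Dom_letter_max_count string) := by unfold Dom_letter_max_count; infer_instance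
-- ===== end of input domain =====

-- B builds no frequency dict: it brute-force counts each letter with list.count, takes the max, and emits the dedup'd letters attaining it (objective: alternative).


-- ===== PORT A =====
-- helper letter_cout: lowercase, split on whitespace, join, count each 1-char string in a dict
def letter_cout (string : String) : PySem.Dict String Int :=
  let parsed := PySem.Str.join "" (PySem.Str.split₀ (PySem.Str.lower string))
  parsed.toList.foldl
    (fun analysis c =>
      let letter := String.mk [c]
      if analysis.contains letter then
        analysis.insert letter (analysis.getD letter 0 + 1)   -- analysis[letter] += 1; key present, so getD is exact
      else
        analysis.insert letter 1)
    PySem.Dict.empty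

def letter_max_count (string : String) : List (String × Int) :=
  let parsed_list := letter_cout string
  let st := parsed_list.keys.foldl
    (fun (st : PySem.Dict String Int × Int) letter =>
      let temp := parsed_list.getD letter 0   -- parsed_list[letter]; letter ∈ keys, so getD is exact
      if temp ≥ st.2 then
        if temp > st.2 then ((PySem.Dict.empty.insert letter temp), temp)
        else (st.1.insert letter temp, st.2)
      else st)
    (PySem.Dict.empty, -1)
  st.1.items

-- ===== PORT B =====
def letter_max_count_alt (string : String) : List (String × Int) :=
  let letters := (PySem.Str.join "" (PySem.Str.split₀ (PySem.Str.lower string))).toList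
  if letters.isEmpty then []
  else
    match PySem.List.max? (letters.map (fun c => PySem.List.count letters c)) (fun x => x) with
    | none => []   -- unreachable: letters nonempty, so the generator is nonempty
    | some m =>
        (PySem.List.dedup letters).filterMap
          (fun c => if PySem.List.count letters c == m then some (String.mk [c], m) else none)

-- ===== PRECONDITION & SPEC =====
def Spec_letter_max_count (string : String) (out : List (String × Int)) : Prop := out = letter_max_count_alt string
instance (string : String) (out : List (String × Int)) : Decidable (Spec_letter_max_count string out) := by unfold Spec_letter_max_count; infer_instance

-- ===== CLAIM (what is proved, stated in full; the proofs are below) =====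
def Claim_equal_letter_max_count : Prop := ∀ (string : String), Dom_letter_max_count string → Spec_letter_max_count string (letter_max_count string)

-- ===== LEMMAS AND PROOFS =====
-- A's selection step, reformulated over (key, value) pairs
def pvSelStep (st : PySem.Dict String Int × Int) (p : String × Int) : PySem.Dict String Int × Int :=
  if p.2 ≥ st.2 then
    if p.2 > st.2 then ((PySem.Dict.empty.insert p.1 p.2), p.2)
    else (st.1.insert p.1 p.2, st.2)
  else st

def pvMaxVal (l : List (String × Int)) : Int := l.foldl (fun m p => max m p.2) (-1)

-- A's selection loop computes the running max and the dict of pairs attaining it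
theorem pvSel_run (l : List (String × Int)) (hv : ∀ p ∈ l, 1 ≤ p.2)
    (hk : (l.map Prod.fst).Nodup) :
    (l.foldl pvSelStep (PySem.Dict.empty, -1)).2 = pvMaxVal l ∧
    (l.foldl pvSelStep (PySem.Dict.empty, -1)).1.items
      = l.filter (fun p => p.2 == pvMaxVal l) := by
  induction l using List.reverseRecOn with
  | nil =>
      constructor <;> rfl
  | append_singleton l p ih =>
      have hv' : ∀ q ∈ l, 1 ≤ q.2 := fun q hq => hv q (by simp [hq])
      have hkmap : (l.map Prod.fst ++ [p.1]).Nodup := by simpa using hk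
      have hk' : (l.map Prod.fst).Nodup := hkmap.of_append_left
      have hp1 : p.1 ∉ l.map Prod.fst := by
        have := List.disjoint_of_nodup_append hkmap
        intro h; exact this h (by simp)
      obtain ⟨ihm, ihd⟩ := ih hv' hk'
      have hle : ∀ q ∈ l, q.2 ≤ pvMaxVal l := by
        have h := PySem.List.le_foldl_max_int l Prod.snd (-1)
        intro q hq
        simpa [pvMaxVal] using h.2 q hq
      have hM : pvMaxVal (l ++ [p]) = max (pvMaxVal l) p.2 := by
        simp [pvMaxVal, List.foldl_append]
      rw [List.foldl_append, List.foldl_cons, List.foldl_nil]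
      rcases lt_trichotomy (pvMaxVal l) p.2 with hgt | heq | hlt
      · -- new strict max: clear and restart
        have hstep : pvSelStep (l.foldl pvSelStep (PySem.Dict.empty, -1)) p
            = ((PySem.Dict.empty.insert p.1 p.2), p.2) := by
          rw [pvSelStep, if_pos (by rw [ihm]; exact le_of_lt hgt), if_pos (by rw [ihm]; exact hgt)]
        rw [hstep, hM, max_eq_right (le_of_lt hgt)]
        refine ⟨rfl, ?_⟩
        have hfl : l.filter (fun q => q.2 == p.2) = [] := by
          rw [List.filter_eq_nil_iff]
          intro q hq
          simp only [beq_iff_eq]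
          exact fun h => absurd (hle q hq) (by omega)
        rw [List.filter_append, hfl,
          PySem.Dict.items_insert_of_not_contains _ _ (PySem.Dict.contains_empty _)]
        simp [PySem.Dict.empty]
      · -- equal to current max: append
        have hcont : (l.foldl pvSelStep (PySem.Dict.empty, -1)).1.contains p.1 = false := by
          rw [PySem.Dict.contains_eq_decide_mem_keys, decide_eq_false_iff_not]
          intro hmem
          apply hp1
          have : p.1 ∈ (l.foldl pvSelStep (PySem.Dict.empty, -1)).1.items.map Prod.fst := by
            simpa [PySem.Dict.keys] using hmem
          rw [ihd] at this
          rcases List.mem_map.1 this with ⟨q, hq, hq1⟩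
          exact hq1 ▸ List.mem_map_of_mem (List.mem_of_mem_filter hq)
        have hstep : pvSelStep (l.foldl pvSelStep (PySem.Dict.empty, -1)) p
            = ((l.foldl pvSelStep (PySem.Dict.empty, -1)).1.insert p.1 p.2,
               (l.foldl pvSelStep (PySem.Dict.empty, -1)).2) := by
          rw [pvSelStep, if_pos (by rw [ihm]; omega), if_neg (by rw [ihm]; omega)]
        rw [hstep, hM, max_eq_left (le_of_eq heq.symm)]
        refine ⟨ihm, ?_⟩
        rw [PySem.Dict.items_insert_of_not_contains _ _ hcont, ihd,
          List.filter_append]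
        simp [heq]
      · -- smaller: unchanged
        have hstep : pvSelStep (l.foldl pvSelStep (PySem.Dict.empty, -1)) p
            = l.foldl pvSelStep (PySem.Dict.empty, -1) := by
          rw [pvSelStep, if_neg (by rw [ihm]; omega)]
        rw [hstep, hM, max_eq_left (le_of_lt hlt)]
        refine ⟨ihm, ?_⟩
        rw [ihd, List.filter_append]
        have : p.2 ≠ pvMaxVal l := by omega
        simp [this]

-- the counting loop of A equals counter
theorem pv_count_eq (cs : List Char) :
    cs.foldl
      (fun analysis c =>
        let letter := String.mk [c]
        if analysis.contains letter then
          analysis.insert letter (analysis.getD letter 0 + 1)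
        else
          analysis.insert letter 1)
      PySem.Dict.empty
    = PySem.Dict.counter (cs.map (fun c => String.mk [c])) := by
  rw [← PySem.Dict.foldl_insert_getD_add_one_eq_counter, List.foldl_map]
  apply PySem.List.foldl_congr_mem
  intro d c _
  by_cases h : d.contains (String.mk [c])
  · simp only [h, if_true]
  · simp only [eq_false_of_ne_true h,
      PySem.Dict.getD_of_not_contains d _ (eq_false_of_ne_true h)]
    norm_num

-- a left fold of max lands on the seed or on a member
theorem pv_foldl_max_mem (zs : List Int) (a : Int) :
    zs.foldl max a = a ∨ zs.foldl max a ∈ zs := by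
  induction zs generalizing a with
  | nil => left; rfl
  | cons z t ih =>
      rcases ih (max a z) with h | h
      · rw [List.foldl_cons, h]
        rcases le_total a z with hz | hz
        · right; simp [max_eq_right hz]
        · left; exact max_eq_left hz
      · right; simp [List.foldl_cons, h]

-- the singleton-string map is injective
theorem pv_sigma_inj : Function.Injective (fun c => String.mk [c]) := by
  intro a b h
  exact List.singleton_injective (String.ofList_injective h)

-- ordered dedup commutes with an injective map
theorem pv_ofList_map (f : Char → String) (hf : Function.Injective f) (cs : List Char) :
    PySem.Set.ofList (cs.map f) = (PySem.Set.ofList cs).map f := by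
  induction cs using List.reverseRecOn with
  | nil => rfl
  | append_singleton l x ih =>
      rw [List.map_append, List.map_singleton, PySem.Set.ofList_append_singleton,
        PySem.Set.ofList_append_singleton, ih, PySem.Set.add, PySem.Set.add]
      have hcont : PySem.Set.contains ((PySem.Set.ofList l).map f) (f x)
          = PySem.Set.contains (PySem.Set.ofList l) x := by
        by_cases hx : x ∈ PySem.Set.ofList l
        · rw [(PySem.Set.contains_iff _ _).2 (List.mem_map_of_mem hx),
            (PySem.Set.contains_iff _ _).2 hx]
        · have h1 : ¬ f x ∈ (PySem.Set.ofList l).map f := fun hmem => hx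
            (by rcases List.mem_map.1 hmem with ⟨y, hy, hyx⟩; exact hf hyx ▸ hy)
          rw [eq_false_of_ne_true (fun h => h1 ((PySem.Set.contains_iff _ _).1 h)),
            eq_false_of_ne_true (fun h => hx ((PySem.Set.contains_iff _ _).1 h))]
      rw [hcont]
      by_cases hx : PySem.Set.contains (PySem.Set.ofList l) x = true
      · rw [if_pos hx, if_pos hx]
      · rw [if_neg hx, if_neg hx, List.map_append, List.map_singleton]

-- the two running maxima agree: over all letters seeded with the head, and over distinct letters seeded with -1
theorem pv_max_eq (v : Char → Int) (c : Char) (t : List Char)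
    (h1 : ∀ x ∈ c :: t, 1 ≤ v x)
    : (t.map v).foldl max (v c) = ((PySem.Set.ofList (c :: t)).map v).foldl max (-1) := by
  have hA_ub : ∀ x ∈ c :: t, v x ≤ (t.map v).foldl max (v c) := by
    have h := PySem.List.le_foldl_max_int t v (v c)
    intro x hx
    rcases List.mem_cons.1 hx with rfl | hx
    · simpa [List.foldl_map] using h.1
    · simpa [List.foldl_map] using h.2 x hx
  have hB_ub : ∀ x ∈ c :: t, v x ≤ ((PySem.Set.ofList (c :: t)).map v).foldl max (-1) := by
    have h := PySem.List.le_foldl_max_int (PySem.Set.ofList (c :: t)) v (-1)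
    intro x hx
    have : x ∈ PySem.Set.ofList (c :: t) := (PySem.Set.mem_ofList _ _).2 hx
    simpa [List.foldl_map] using h.2 x this
  have hA_mem : ∃ x ∈ c :: t, (t.map v).foldl max (v c) = v x := by
    rcases pv_foldl_max_mem (t.map v) (v c) with h | h
    · exact ⟨c, by simp, h⟩
    · rcases List.mem_map.1 h with ⟨x, hx, hvx⟩
      exact ⟨x, List.mem_cons_of_mem _ hx, hvx.symm⟩
  have hB_mem : ∃ x ∈ c :: t, ((PySem.Set.ofList (c :: t)).map v).foldl max (-1) = v x := by
    rcases pv_foldl_max_mem ((PySem.Set.ofList (c :: t)).map v) (-1) with h | h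
    · exfalso
      have := hB_ub c (by simp)
      have := h1 c (by simp)
      omega
    · rcases List.mem_map.1 h with ⟨x, hx, hvx⟩
      exact ⟨x, (PySem.Set.mem_ofList _ _).1 hx, hvx.symm⟩
  rcases hA_mem with ⟨x, hx, hxe⟩
  rcases hB_mem with ⟨y, hy, hye⟩
  have := hB_ub x hx
  have := hA_ub y hy
  omega

-- a running max over Nat counts casts to the running max over their Int casts
theorem pv_foldl_max_cast (vN : Char → Nat) (v : Char → Int) (hv : ∀ x, (vN x : Int) = v x) :
    ∀ (t : List Char) (a : Nat),
      (((t.map vN).foldl max a : Nat) : Int) = (t.map v).foldl max (a : Int) := by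
  intro t
  induction t with
  | nil => intro a; rfl
  | cons z t ih =>
      intro a
      rw [List.map_cons, List.foldl_cons, List.map_cons, List.foldl_cons, ih, Nat.cast_max, hv]

-- comprehension with a filter = filter then map
theorem pv_filterMap_if {α β : Type} (p : α → Bool) (g : α → β) (l : List α) :
    l.filterMap (fun x => if p x then some (g x) else none) = (l.filter p).map g := by
  induction l with
  | nil => rfl
  | cons x t ih =>
      by_cases h : p x
      · simp [h, ih]
      · simp [h, ih]

theorem pv_main (string : String) :
    letter_max_count string = letter_max_count_alt string := by
  rw [letter_max_count, letter_cout, pv_count_eq]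
  set cs := (PySem.Str.join "" (PySem.Str.split₀ (PySem.Str.lower string))).toList with hcs
  set σ := fun c => String.mk [c] with hσ
  set L := cs.map σ with hL
  set v := fun c => (List.count c cs : Int) with hv0
  -- A's items, keys, values
  set l := (PySem.Set.ofList L).map (fun k => (k, (List.count k L : Int))) with hl
  have hcnt : ∀ c : Char, List.count (σ c) L = List.count c cs := by
    intro c
    exact List.count_map_of_injective cs σ pv_sigma_inj c
  have hl2 : l = (PySem.Set.ofList cs).map (fun c => (σ c, v c)) := by
    rw [hl, hL, pv_ofList_map σ pv_sigma_inj, List.map_map]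
    apply List.map_congr_left
    intro c _
    show (σ c, (List.count (σ c) L : Int)) = (σ c, v c)
    rw [hcnt c]
  have hv1 : ∀ p ∈ l, 1 ≤ p.2 := by
    intro p hp
    rw [hl2] at hp
    rcases List.mem_map.1 hp with ⟨c, hc, rfl⟩
    have : c ∈ cs := (PySem.Set.mem_ofList cs c).1 hc
    have h1 := List.count_pos_iff.2 this
    show (1:Int) ≤ (List.count c cs : Int)
    exact_mod_cast h1
  have hknd : (l.map Prod.fst).Nodup := by
    have h : l.map Prod.fst = PySem.Set.ofList L := by
      rw [hl, List.map_map]; exact List.map_id _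
    rw [h]; exact PySem.Set.nodup_ofList L
  obtain ⟨hm, hd⟩ := pvSel_run l hv1 hknd
  have hfold : (PySem.Dict.counter L).keys.foldl
      (fun (st : PySem.Dict String Int × Int) letter =>
        let temp := (PySem.Dict.counter L).getD letter 0
        if temp ≥ st.2 then
          if temp > st.2 then ((PySem.Dict.empty.insert letter temp), temp)
          else (st.1.insert letter temp, st.2)
        else st)
      (PySem.Dict.empty, -1)
      = l.foldl pvSelStep (PySem.Dict.empty, -1) := by
    rw [hl, List.foldl_map, PySem.Dict.keys_counter]
    apply PySem.List.foldl_congr_mem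
    intro st k _
    simp only [PySem.Dict.getD_counter, pvSelStep]
  rw [hfold, hd]
  -- now the B side
  rw [letter_max_count_alt, ← hcs]
  cases hcase : cs with
  | nil =>
      rw [hcase] at hl2
      simp [hl2, PySem.Set.ofList]
  | cons c t =>
      rw [← hcase]
      have hMv : pvMaxVal l = ((PySem.Set.ofList cs).map (fun c => (σ c, v c))).foldl
          (fun m p => max m p.2) (-1) := by rw [pvMaxVal, hl2]
      have hM2 : pvMaxVal l = ((PySem.Set.ofList cs).map v).foldl max (-1) := by
        rw [hMv, List.foldl_map, List.foldl_map]
      have h1 : ∀ x ∈ c :: t, 1 ≤ v x := by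
        intro x hx
        have : x ∈ cs := hcase ▸ hx
        have h1 := List.count_pos_iff.2 this
        show (1:Int) ≤ (List.count x cs : Int)
        exact_mod_cast h1
      have hmax : (t.map v).foldl max (v c) = pvMaxVal l := by
        rw [hM2, hcase]
        exact pv_max_eq v c t h1
      set vN := fun x => List.count x cs with hvN
      have hcast : ((((t.map vN).foldl max (vN c)) : Nat) : Int) = (t.map v).foldl max (v c) := by
        rw [pv_foldl_max_cast vN v (fun _ => rfl) t (vN c),
          show ((vN c : Nat) : Int) = v c from rfl]
      set mN := (t.map vN).foldl max (vN c) with hmN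
      have hmZ : ((mN : Nat) : Int) = pvMaxVal l := by rw [hmN, hcast, hmax]
      have hne : cs.isEmpty = false := by rw [hcase]; rfl
      rw [hne, if_neg (by simp)]
      have hcountv : ∀ x : Char, PySem.List.count cs x = vN x := by
        intro x; rw [PySem.List.count_eq]
      have hmap : cs.map (fun x => PySem.List.count cs x) = vN c :: t.map vN := by
        have h0 : cs.map (fun x => PySem.List.count cs x) = cs.map vN :=
          List.map_congr_left (fun x _ => hcountv x)
        rw [h0, hcase, List.map_cons]
      rw [hmap, PySem.List.max?_id_cons]
      show List.filter (fun p => p.2 == pvMaxVal l) l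
          = (PySem.List.dedup cs).filterMap
              (fun x => if PySem.List.count cs x == mN then some (String.mk [x], (mN : Int)) else none)
      rw [PySem.List.dedup_eq_ofList,
        pv_filterMap_if (fun x => PySem.List.count cs x == mN)
          (fun x => (String.mk [x], (mN : Int))) (PySem.Set.ofList cs)]
      have hfm : ∀ x : Char, (PySem.List.count cs x == mN) = (v x == pvMaxVal l) := by
        intro x
        rw [hcountv x, ← hmZ, Bool.eq_iff_iff, beq_iff_eq, beq_iff_eq]
        constructor
        · intro h
          show ((vN x : Nat) : Int) = ((mN : Nat) : Int)
          exact_mod_cast h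
        · intro h
          have h2 : ((vN x : Nat) : Int) = ((mN : Nat) : Int) := h
          exact_mod_cast h2
      have hBf : (PySem.Set.ofList cs).filter (fun x => PySem.List.count cs x == mN)
          = (PySem.Set.ofList cs).filter (fun x => v x == pvMaxVal l) :=
        List.filter_congr (fun x _ => hfm x)
      rw [hBf, hl2, List.filter_map]
      have hcomp : ∀ (ll : List (String × Int)),
          ((fun p : String × Int => p.2 == pvMaxVal ll) ∘ fun c => (σ c, v c))
          = fun x => v x == pvMaxVal ll := fun _ => funext (fun _ => rfl)
      rw [hcomp _, ← hl2]
      apply List.map_congr_left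
      intro x hx
      have hxv : v x = pvMaxVal l := by simpa using List.of_mem_filter hx
      show (σ x, v x) = (String.mk [x], (mN : Int))
      rw [hxv, ← hmZ]

-- ===== VERDICT (by name: the statement is the Claim_ definition above) =====
theorem letter_max_count_spec : Claim_equal_letter_max_count := by
  intro string _
  exact pv_main string
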